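-- pv_equiv track=rewrite | github.com/Umbral-Bot/umbral-agent-stack | dispatcher/extractors/notion_comment_paginator.py | _build_header_with_footer
-- ===== SOURCE A (Python) =====
-- SAFE_LIMIT: int = 1900
--
-- def _build_header_with_footer(text: str, footer: str) -> str:
--     """Take leading lines of ``text`` until adding the next would exceed
--     ``SAFE_LIMIT - len(footer)``. Append ``footer`` at the end.
--
--     Always preserves at least the first non-empty line (even if that means
--     truncating it inside the budget).
--     """
--     budget = SAFE_LIMIT - len(footer)
--     if budget <= 0:
--         # Pathological footer; just send footer alone, hard-truncated.
--         return footer[:SAFE_LIMIT]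
--
--     lines = text.split("\n")
--     out_lines: list[str] = []
--     used = 0
--     for line in lines:
--         # +1 accounts for the joining "\n" if there's already content.
--         cost = len(line) + (1 if out_lines else 0)
--         if used + cost > budget:
--             break
--         out_lines.append(line)
--         used += cost
--
--     if not out_lines:
--         # Force-include the first line, hard-truncated to budget.
--         first = lines[0] if lines else ""
--         out_lines = [first[:budget]]
--
--     return "\n".join(out_lines) + footer
-- ===== SOURCE B (Python) =====
-- SAFE_LIMIT: int = 1900
--
-- def _build_header_with_footer(text: str, footer: str) -> str:
--     """String-search re-implementation: instead of splitting into lines and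
--     greedily accumulating them, locate the cut point directly in ``text``.
--     The kept head is the longest prefix of ``text`` that fits the budget and
--     ends at a line boundary (the last '\\n' inside the budget window), with
--     the same hard-truncation fallback when not even the first line fits."""
--     budget = SAFE_LIMIT - len(footer)
--     if budget <= 0:
--         return footer[:SAFE_LIMIT]
--     if len(text) <= budget:
--         return text + footer
--     cut = text.rfind("\n", 0, budget + 1)
--     if cut == -1:
--         return text[:budget] + footer
--     return text[:cut] + footer
-- ===== Notes on version B (the rewrite author's own statement) =====
-- stated objective: alternative
-- what changed: Replaces A's split-into-lines plus greedy accumulate-and-join loop by a direct string search: B keeps the whole text when it fits, otherwise cuts at the last newline found by str.rfind inside the budget window (falling back to a hard truncation when no newline fits), never building the line list.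
import Mathlib
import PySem

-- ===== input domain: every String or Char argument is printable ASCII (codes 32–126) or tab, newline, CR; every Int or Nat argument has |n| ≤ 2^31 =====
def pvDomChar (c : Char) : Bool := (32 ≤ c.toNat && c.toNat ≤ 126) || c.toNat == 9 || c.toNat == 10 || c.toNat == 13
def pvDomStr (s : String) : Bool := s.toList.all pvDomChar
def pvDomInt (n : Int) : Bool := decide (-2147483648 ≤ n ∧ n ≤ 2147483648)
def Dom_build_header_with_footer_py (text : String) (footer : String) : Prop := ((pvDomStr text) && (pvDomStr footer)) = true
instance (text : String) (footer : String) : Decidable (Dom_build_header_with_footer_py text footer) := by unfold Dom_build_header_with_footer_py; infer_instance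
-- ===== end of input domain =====

-- B replaces A's split-into-lines + greedy accumulate-and-join scan by a direct string
-- search: the kept head is text up to the last '\n' inside the budget window (str.rfind),
-- with the same whole-text and truncated-first-line cases; objective: alternative.

-- ===== PORT A =====
-- A's for-loop with break: out_lines/used accumulators, stop on the first line whose cost exceeds the budget.
def pvALoop (budget : Int) : List String → List String → Int → List String
  | [], out, _ => out
  | l :: rest, out, used =>
    let cost : Int := PySem.Str.len l + (if out.isEmpty then 0 else 1)
    if used + cost > budget then out
    else pvALoop budget rest (out ++ [l]) (used + cost)

def build_header_with_footer_py (text : String) (footer : String) : String :=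
  let budget : Int := 1900 - PySem.Str.len footer
  if budget ≤ 0 then
    PySem.Str.slice footer none (some 1900)
  else
    -- text.split("\n"): the separator is the non-empty literal "\n", so split? is always some
    let lines : List String := (PySem.Str.split? text "\n").getD []
    let out_lines : List String := pvALoop budget lines [] 0
    let out_lines : List String :=
      if out_lines.isEmpty then
        let first : String := lines.headD ""   -- lines[0] if lines else ""
        [PySem.Str.slice first none (some budget)]
      else out_lines
    PySem.Str.join "\n" out_lines ++ footer

-- ===== PORT B =====
def build_header_with_footer_py_alt (text : String) (footer : String) : String :=
  let budget : Int := 1900 - PySem.Str.len footer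
  if budget ≤ 0 then
    PySem.Str.slice footer none (some 1900)
  else if PySem.Str.len text ≤ budget then
    text ++ footer
  else
    -- text.rfind("\n", 0, budget + 1)
    let cut : Int := PySem.Str.rfindFrom text "\n" 0 (some (budget + 1))
    if cut == -1 then
      PySem.Str.slice text none (some budget) ++ footer
    else
      PySem.Str.slice text none (some cut) ++ footer

-- ===== PRECONDITION & SPEC =====
def Spec_build_header_with_footer_py (text : String) (footer : String) (out : String) : Prop := out = build_header_with_footer_py_alt text footer
instance (text : String) (footer : String) (out : String) : Decidable (Spec_build_header_with_footer_py text footer out) := by unfold Spec_build_header_with_footer_py; infer_instance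

-- ===== CLAIM (what is proved, stated in full; the proofs are below) =====
def Claim_equal_build_header_with_footer_py : Prop := ∀ (text : String) (footer : String), Dom_build_header_with_footer_py text footer → Spec_build_header_with_footer_py text footer (build_header_with_footer_py text footer)

-- ===== LEMMAS AND PROOFS =====

-- clean recursive split of a char list on '\n' (shown equal to PySem.Chars.splitOn below)
def pvSplit : List Char → List (List Char)
  | [] => [[]]
  | c :: r => if c = '\n' then [] :: pvSplit r else (pvSplit r).modifyHead (c :: ·)

-- index of the LAST '\n' in a char list, none if absent
def pvLastNl : List Char → Option Nat
  | [] => none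
  | c :: r =>
    match pvLastNl r with
    | some k => some (k + 1)
    | none => if c = '\n' then some 0 else none

-- greedy tail take: every line costs len+1 (the joining '\n')
def pvTakeLines (b : Int) : List (List Char) → List (List Char)
  | [] => []
  | l :: ls => if b < (l.length : Int) + 1 then [] else l :: pvTakeLines (b - ((l.length : Int) + 1)) ls

-- greedy head take: the first line costs only its length
def pvHeadLines (b : Int) : List (List Char) → List (List Char)
  | [] => []
  | l :: ls => if b < (l.length : Int) then [] else l :: pvTakeLines (b - (l.length : Int)) ls

-- String-level mirrors of the two greedy takes
def pvTakeLinesS (b : Int) : List String → List String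
  | [] => []
  | l :: ls => if b < PySem.Str.len l + 1 then [] else l :: pvTakeLinesS (b - (PySem.Str.len l + 1)) ls

def pvHeadLinesS (b : Int) : List String → List String
  | [] => []
  | l :: ls => if b < PySem.Str.len l then [] else l :: pvTakeLinesS (b - PySem.Str.len l) ls

theorem pvTakeLines_pos {b : Int} {l : List Char} {ls : List (List Char)}
    (h : b < (l.length : Int) + 1) : pvTakeLines b (l :: ls) = [] := by
  simp only [pvTakeLines]; rw [if_pos h]

theorem pvTakeLines_neg {b : Int} {l : List Char} {ls : List (List Char)}
    (h : ¬ b < (l.length : Int) + 1) :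
    pvTakeLines b (l :: ls) = l :: pvTakeLines (b - ((l.length : Int) + 1)) ls := by
  simp only [pvTakeLines]; rw [if_neg h]

theorem pvHeadLines_pos {b : Int} {l : List Char} {ls : List (List Char)}
    (h : b < (l.length : Int)) : pvHeadLines b (l :: ls) = [] := by
  simp only [pvHeadLines]; rw [if_pos h]

theorem pvHeadLines_neg {b : Int} {l : List Char} {ls : List (List Char)}
    (h : ¬ b < (l.length : Int)) :
    pvHeadLines b (l :: ls) = l :: pvTakeLines (b - (l.length : Int)) ls := by
  simp only [pvHeadLines]; rw [if_neg h]

theorem pvSplit_ne_nil (cs : List Char) : pvSplit cs ≠ [] := by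
  cases cs with
  | nil => simp [pvSplit]
  | cons c r =>
    simp only [pvSplit]
    split
    · simp
    · cases h : pvSplit r with
      | nil => exact absurd h (pvSplit_ne_nil r)
      | cons x xs => simp

-- helper for relating splitOn.go's accumulator to pvSplit
def pvConsHead (p : List Char) : List (List Char) → List (List Char)
  | [] => [p]
  | x :: xs => (p ++ x) :: xs

theorem pvGo_spec : ∀ (f : Nat) (l cur : List Char) (acc : List (List Char)), l.length < f →
    PySem.Chars.splitOn.go ['\n'] f l cur acc = acc.reverse ++ pvConsHead cur.reverse (pvSplit l) := by
  intro f
  induction f with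
  | zero => intro l cur acc h; omega
  | succ f ih =>
    intro l cur acc h
    cases l with
    | nil => simp [PySem.Chars.splitOn.go, pvSplit, pvConsHead]
    | cons c rest =>
      rw [PySem.Chars.splitOn.go]
      by_cases hc : c = '\n'
      · subst hc
        have hp : ['\n'].isPrefixOf ('\n' :: rest) = true := by simp [List.isPrefixOf]
        simp only [hp, if_true, List.length_cons, List.drop_succ_cons, List.length_nil,
          List.drop_zero]
        rw [ih rest [] _ (by simpa using Nat.lt_of_succ_lt_succ h)]
        simp [pvSplit]
        cases hs : pvSplit rest with
        | nil => exact absurd hs (pvSplit_ne_nil rest)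
        | cons x xs => simp [pvConsHead]
      · have hp : ['\n'].isPrefixOf (c :: rest) = false := by
          simp [List.isPrefixOf]; exact fun hh => absurd hh.symm hc
        simp only [hp, Bool.false_eq_true, if_false]
        rw [ih rest (c :: cur) acc (by simpa using Nat.lt_of_succ_lt_succ h)]
        simp only [pvSplit, hc, if_false, List.reverse_cons]
        cases hs : pvSplit rest with
        | nil => exact absurd hs (pvSplit_ne_nil rest)
        | cons x xs => simp [pvConsHead]

theorem pvSplitOn_eq (cs : List Char) : PySem.Chars.splitOn cs ['\n'] = pvSplit cs := by
  rw [PySem.Chars.splitOn, pvGo_spec (cs.length + 1) cs [] [] (by omega)]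
  cases hs : pvSplit cs with
  | nil => exact absurd hs (pvSplit_ne_nil cs)
  | cons x xs => simp [pvConsHead]

-- intercalate over a cons with a nonempty tail
theorem pvIC {T : List (List Char)} (x : List Char) (h : T ≠ []) :
    List.intercalate ['\n'] (x :: T) = x ++ '\n' :: List.intercalate ['\n'] T := by
  cases T with
  | nil => exact absurd rfl h
  | cons y ys => simp [List.intercalate, List.intersperse]

theorem pvIC2 (c : Char) (x : List Char) (T : List (List Char)) :
    List.intercalate ['\n'] ((c :: x) :: T) = c :: List.intercalate ['\n'] (x :: T) := by
  cases T with
  | nil => simp [List.intercalate]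
  | cons y ys => simp [List.intercalate, List.intersperse]

theorem pvIntercalate_split (cs : List Char) : List.intercalate ['\n'] (pvSplit cs) = cs := by
  induction cs with
  | nil => simp [pvSplit, List.intercalate]
  | cons c r ih =>
    simp only [pvSplit]
    by_cases hc : c = '\n'
    · subst hc
      simp only [if_true]
      rw [pvIC [] (pvSplit_ne_nil r)]
      simp [ih]
    · simp only [hc, if_false]
      cases hs : pvSplit r with
      | nil => exact absurd hs (pvSplit_ne_nil r)
      | cons x xs =>
        simp only [List.modifyHead]
        rw [pvIC2, ← hs, ih]

-- ===== greedy take = last newline in the window (the heart of the equivalence) =====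

theorem pvTail_window (rest : List Char) : ∀ (β : Nat), β ≤ rest.length →
    (match pvLastNl (rest.take β) with
     | none => pvTakeLines (β : Int) (pvSplit rest) = []
     | some j => pvTakeLines (β : Int) (pvSplit rest) ≠ [] ∧
         List.intercalate ['\n'] (pvTakeLines (β : Int) (pvSplit rest)) = rest.take j) := by
  induction rest with
  | nil =>
    intro β hβ
    have : β = 0 := by simpa using hβ
    subst this
    simp [pvLastNl, pvSplit, pvTakeLines]
  | cons c r ih =>
    intro β hβ
    by_cases hc : c = '\n'
    · subst hc
      simp only [pvSplit, if_true]
      cases β with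
      | zero => simp [pvLastNl, pvTakeLines]
      | succ β' =>
        have hcond : ¬ ((β' + 1 : Nat) : Int) < ((([] : List Char)).length : Int) + 1 := by
          simp only [List.length_nil]; push_cast; omega
        rw [pvTakeLines_neg hcond]
        have hb : ((β' + 1 : Nat) : Int) - ((([] : List Char)).length : Int) - 1 = (β' : Int) := by
          simp only [List.length_nil]; push_cast; ring
        have hb' : ((β' + 1 : Nat) : Int) - (((([] : List Char)).length : Int) + 1) = (β' : Int) := by
          simp only [List.length_nil]; push_cast; ring
        rw [hb']
        have hrec := ih β' (by simpa using hβ)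
        simp only [List.take_succ_cons, pvLastNl]
        cases hl : pvLastNl (r.take β') with
        | none =>
          rw [hl] at hrec
          refine ⟨by simp, ?_⟩
          simp [hrec, List.intercalate]
        | some j =>
          rw [hl] at hrec
          refine ⟨by simp, ?_⟩
          rw [pvIC [] hrec.1]
          simp [hrec.2]
    · simp only [pvSplit, hc, if_false]
      cases hs : pvSplit r with
      | nil => exact absurd hs (pvSplit_ne_nil r)
      | cons x xs =>
        simp only [List.modifyHead]
        cases β with
        | zero =>
          have hz : ((0 : Nat) : Int) < (((c :: x)).length : Int) + 1 := by
            simp only [List.length_cons]; push_cast; omega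
          rw [List.take_zero]
          simp only [pvLastNl]
          rw [pvTakeLines_pos hz]
        | succ β' =>
          have hrec := ih β' (by simpa using hβ)
          rw [hs] at hrec
          simp only [List.take_succ_cons, pvLastNl, hc, if_false]
          cases hl : pvLastNl (r.take β') with
          | none =>
            rw [hl] at hrec
            have hcond : ((β' : Int)) < (x.length : Int) + 1 := by
              by_contra hcon
              rw [pvTakeLines_neg hcon] at hrec
              simp at hrec
            have hcond2 : ((β' + 1 : Nat) : Int) < (((c :: x)).length : Int) + 1 := by
              simp only [List.length_cons]; push_cast at hcond ⊢; omega
            rw [pvTakeLines_pos hcond2]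
          | some j =>
            rw [hl] at hrec
            have hne := hrec.1
            have hcond : ¬ ((β' : Int)) < (x.length : Int) + 1 :=
              fun hcon => hne (pvTakeLines_pos hcon)
            have hcond2 : ¬ ((β' + 1 : Nat) : Int) < (((c :: x)).length : Int) + 1 := by
              simp only [List.length_cons]; push_cast at hcond ⊢; omega
            rw [pvTakeLines_neg hcond2]
            refine ⟨by simp, ?_⟩
            have hb : ((β' + 1 : Nat) : Int) - ((((c :: x)).length : Int) + 1)
                = (β' : Int) - ((x.length : Int) + 1) := by
              simp only [List.length_cons]; push_cast; ring
            rw [hb]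
            rw [pvIC2, ← pvTakeLines_neg hcond, hrec.2]
            simp [List.take_succ_cons]

theorem pvHead_window (cs : List Char) : ∀ (b : Nat), b < cs.length →
    (match pvLastNl (cs.take (b + 1)) with
     | none => pvHeadLines (b : Int) (pvSplit cs) = [] ∧
         ((pvSplit cs).headD []).take b = cs.take b
     | some k => pvHeadLines (b : Int) (pvSplit cs) ≠ [] ∧
         List.intercalate ['\n'] (pvHeadLines (b : Int) (pvSplit cs)) = cs.take k) := by
  induction cs with
  | nil => intro b hb; simp at hb
  | cons c r ih =>
    intro b hb
    by_cases hc : c = '\n'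
    · subst hc
      simp only [pvSplit, if_true, List.take_succ_cons, pvLastNl]
      have hcond : ¬ ((b : Nat) : Int) < ((([] : List Char)).length : Int) := by
        simp only [List.length_nil]; push_cast; omega
      rw [pvHeadLines_neg hcond]
      have hb0 : ((b : Nat) : Int) - ((([] : List Char)).length : Int) = (b : Int) := by
        simp only [List.length_nil]; push_cast; ring
      rw [hb0]
      have hrec := pvTail_window r b (by simpa using hb)
      cases hl : pvLastNl (r.take b) with
      | none =>
        rw [hl] at hrec
        refine ⟨by simp, ?_⟩
        simp [hrec, List.intercalate]
      | some j =>
        rw [hl] at hrec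
        refine ⟨by simp, ?_⟩
        rw [pvIC [] hrec.1]
        simp [hrec.2]
    · simp only [pvSplit, hc, if_false]
      cases hs : pvSplit r with
      | nil => exact absurd hs (pvSplit_ne_nil r)
      | cons x xs =>
        simp only [List.modifyHead, List.take_succ_cons, pvLastNl]
        cases b with
        | zero =>
          have hw : pvLastNl (r.take 0) = none := by simp [pvLastNl]
          rw [hw]
          simp only [hc, if_false]
          have hz : ((0 : Nat) : Int) < (((c :: x)).length : Int) := by
            simp only [List.length_cons]; push_cast; omega
          rw [pvHeadLines_pos hz]
          exact ⟨rfl, by simp⟩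
        | succ b' =>
          have hrec := ih b' (by simpa using hb)
          rw [hs] at hrec
          cases hl : pvLastNl (r.take (b' + 1)) with
          | none =>
            rw [hl] at hrec
            simp only [hc, if_false]
            have h1 := hrec.1
            have hcond : ((b' : Nat) : Int) < (x.length : Int) := by
              by_contra hcon
              rw [pvHeadLines_neg hcon] at h1
              simp at h1
            have hcond2 : ((b' + 1 : Nat) : Int) < (((c :: x)).length : Int) := by
              simp only [List.length_cons]; push_cast at hcond ⊢; omega
            rw [pvHeadLines_pos hcond2]
            refine ⟨rfl, ?_⟩
            have h2 := hrec.2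
            simp only [List.headD_cons] at h2 ⊢
            simp only [List.take_succ_cons]
            rw [h2]
          | some k' =>
            rw [hl] at hrec
            have hne := hrec.1
            have hcond : ¬ ((b' : Nat) : Int) < (x.length : Int) :=
              fun hcon => hne (pvHeadLines_pos hcon)
            have hcond2 : ¬ ((b' + 1 : Nat) : Int) < (((c :: x)).length : Int) := by
              simp only [List.length_cons]; push_cast at hcond ⊢; omega
            rw [pvHeadLines_neg hcond2]
            refine ⟨by simp, ?_⟩
            have hb2 : ((b' + 1 : Nat) : Int) - (((c :: x)).length : Int)
                = (b' : Int) - (x.length : Int) := by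
              simp only [List.length_cons]; push_cast; ring
            rw [hb2]
            rw [pvIC2, ← pvHeadLines_neg hcond, hrec.2]
            simp [List.take_succ_cons]

-- ===== the full-fit case: everything is kept when the whole text fits =====

theorem pvTakeLines_full (T : List (List Char)) : ∀ (b : Int),
    ((List.intercalate ['\n'] T).length : Int) + 1 ≤ b ∨ T = [] → pvTakeLines b T = T := by
  induction T with
  | nil => intro b _; simp [pvTakeLines]
  | cons x xs ih =>
    intro b hb
    rcases hb with hb | hb
    · have hlen : ((List.intercalate ['\n'] (x :: xs)).length : Int)
          = (x.length : Int) + (if xs = [] then 0 else ((List.intercalate ['\n'] xs).length : Int) + 1) := by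
        by_cases hxs : xs = []
        · subst hxs; simp [List.intercalate]
        · rw [pvIC x hxs]; simp [hxs]
      have hcond : ¬ b < (x.length : Int) + 1 := by
        rw [hlen] at hb; split_ifs at hb <;> omega
      simp only [pvTakeLines, hcond, if_false]
      rw [ih (b - ((x.length : Int) + 1)) ?_]
      by_cases hxs : xs = []
      · right; exact hxs
      · left; rw [hlen] at hb; simp only [hxs, if_false] at hb; omega
    · simp at hb

theorem pvHeadLines_full (T : List (List Char)) (b : Int) (hne : T ≠ [])
    (hb : ((List.intercalate ['\n'] T).length : Int) ≤ b) : pvHeadLines b T = T := by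
  cases T with
  | nil => exact absurd rfl hne
  | cons x xs =>
    have hlen : ((List.intercalate ['\n'] (x :: xs)).length : Int)
        = (x.length : Int) + (if xs = [] then 0 else ((List.intercalate ['\n'] xs).length : Int) + 1) := by
      by_cases hxs : xs = []
      · subst hxs; simp [List.intercalate]
      · rw [pvIC x hxs]; simp [hxs]
    have hcond : ¬ b < (x.length : Int) := by
      rw [hlen] at hb; split_ifs at hb <;> omega
    simp only [pvHeadLines, hcond, if_false]
    rw [pvTakeLines_full xs (b - (x.length : Int)) ?_]
    by_cases hxs : xs = []
    · right; exact hxs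
    · left; rw [hlen] at hb; simp only [hxs, if_false] at hb; omega

-- ===== A's loop equals the greedy head take =====

theorem pvALoop_eq_takeS (ls : List String) : ∀ (out : List String) (used b : Int), out ≠ [] →
    pvALoop b ls out used = out ++ pvTakeLinesS (b - used) ls := by
  induction ls with
  | nil => intro out used b _; simp [pvALoop, pvTakeLinesS]
  | cons l rest ih =>
    intro out used b hout
    have hie : out.isEmpty = false := by simpa [List.isEmpty_iff] using hout
    simp only [pvALoop, hie, Bool.false_eq_true, if_false, pvTakeLinesS]
    split_ifs with h1 h2 h2
    · simp
    · omega
    · omega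
    · rw [ih (out ++ [l]) _ _ (by simp)]
      have : b - (used + (PySem.Str.len l + 1)) = b - used - (PySem.Str.len l + 1) := by ring
      rw [this]
      simp

theorem pvALoop_eq_headS (ls : List String) (b : Int) :
    pvALoop b ls [] 0 = pvHeadLinesS b ls := by
  cases ls with
  | nil => simp [pvALoop, pvHeadLinesS]
  | cons l rest =>
    simp only [pvALoop, List.isEmpty_nil, if_true, add_zero, zero_add, pvHeadLinesS]
    split_ifs with h1
    · simp
    · simp only [List.nil_append]
      rw [pvALoop_eq_takeS rest [l] _ _ (by simp)]
      simp

-- the String-level greedy equals the char-level greedy over ofList lines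
theorem pvTakeLinesS_map (T : List (List Char)) : ∀ (b : Int),
    pvTakeLinesS b (T.map String.ofList) = (pvTakeLines b T).map String.ofList := by
  induction T with
  | nil => intro b; simp [pvTakeLinesS, pvTakeLines]
  | cons x xs ih =>
    intro b
    have hlen : PySem.Str.len (String.ofList x) = (x.length : Int) := by
      rw [PySem.Str.len_eq]; simp
    simp only [List.map_cons, pvTakeLinesS, pvTakeLines, hlen]
    split_ifs
    · simp
    · simp [ih]

theorem pvHeadLinesS_map (T : List (List Char)) (b : Int) :
    pvHeadLinesS b (T.map String.ofList) = (pvHeadLines b T).map String.ofList := by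
  cases T with
  | nil => simp [pvHeadLinesS, pvHeadLines]
  | cons x xs =>
    have hlen : PySem.Str.len (String.ofList x) = (x.length : Int) := by
      rw [PySem.Str.len_eq]; simp
    simp only [List.map_cons, pvHeadLinesS, pvHeadLines, hlen]
    split_ifs
    · simp
    · simp [pvTakeLinesS_map]

-- ===== rfind = last newline =====

theorem pvPrefixOf_nl (l : List Char) : (['\n'].isPrefixOf l) = (l.head? == some '\n') := by
  cases l with
  | nil => simp [List.isPrefixOf]
  | cons c r => simp [List.isPrefixOf, BEq.comm]

theorem pvLastNl_none (w : List Char) (h : pvLastNl w = none) : ∀ i : Nat, w[i]? ≠ some '\n' := by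
  induction w with
  | nil => intro i; simp
  | cons c r ih =>
    intro i
    simp only [pvLastNl] at h
    cases hl : pvLastNl r with
    | some k => rw [hl] at h; simp at h
    | none =>
      rw [hl] at h
      have hc : c ≠ '\n' := by by_contra hc; subst hc; simp at h
      cases i with
      | zero => simpa using hc
      | succ i' => simpa using ih hl i'

theorem pvLastNl_some (w : List Char) : ∀ k, pvLastNl w = some k →
    w[k]? = some '\n' ∧ ∀ i : Nat, k < i → w[i]? ≠ some '\n' := by
  induction w with
  | nil => intro k h; simp [pvLastNl] at h
  | cons c r ih =>
    intro k h
    simp only [pvLastNl] at h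
    cases hl : pvLastNl r with
    | some k' =>
      rw [hl] at h
      simp only [Option.some.injEq] at h
      subst h
      obtain ⟨h1, h2⟩ := ih k' hl
      refine ⟨by simpa using h1, ?_⟩
      intro i hi
      cases i with
      | zero => omega
      | succ i' => simpa using h2 i' (by omega)
    | none =>
      rw [hl] at h
      have hc : c = '\n' ∧ k = 0 := by
        by_cases hc : c = '\n'
        · subst hc; simp at h; exact ⟨rfl, h.symm⟩
        · simp [hc] at h
      obtain ⟨hc, hk⟩ := hc
      subst hc; subst hk
      refine ⟨by simp, ?_⟩
      intro i hi
      cases i with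
      | zero => omega
      | succ i' => simpa using pvLastNl_none r hl i'

theorem pvGoNl_none (w : List Char) (h : pvLastNl w = none) :
    ∀ j, PySem.Chars.rfind.go w ['\n'] j = -1 := by
  intro j
  induction j with
  | zero =>
    rw [PySem.Chars.rfind.go]
    have := pvLastNl_none w h 0
    rw [pvPrefixOf_nl]
    simp only [List.head?_eq_getElem?] at *
    simp [this]
  | succ j' ih =>
    rw [PySem.Chars.rfind.go]
    have := pvLastNl_none w h (j' + 1)
    rw [pvPrefixOf_nl, List.head?_drop]
    simp [this, ih]

theorem pvGoNl_some (w : List Char) (k : Nat) (h : pvLastNl w = some k) :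
    ∀ j, k ≤ j → PySem.Chars.rfind.go w ['\n'] j = (k : Int) := by
  obtain ⟨h1, h2⟩ := pvLastNl_some w k h
  intro j
  induction j with
  | zero =>
    intro hk
    have hk0 : k = 0 := by omega
    subst hk0
    rw [PySem.Chars.rfind.go, pvPrefixOf_nl]
    simp only [List.head?_eq_getElem?]
    simp [h1]
  | succ j' ih =>
    intro hk
    rw [PySem.Chars.rfind.go, pvPrefixOf_nl, List.head?_drop]
    by_cases he : k = j' + 1
    · subst he; simp [h1]
    · have : w[j' + 1]? ≠ some '\n' := h2 (j' + 1) (by omega)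
      simp [this, ih (by omega)]

theorem pvRfind_eq (w : List Char) :
    PySem.Chars.rfind w ['\n'] =
      (match pvLastNl w with | none => (-1 : Int) | some k => (k : Int)) := by
  rw [PySem.Chars.rfind]
  cases hl : pvLastNl w with
  | none => simp [pvGoNl_none w hl]
  | some k =>
    have hk : k < w.length := by
      have := (pvLastNl_some w k hl).1
      exact List.getElem?_eq_some_iff.mp this |>.1
    simp [pvGoNl_some w k hl w.length (by omega)]

theorem pvRfindFrom_eq (cs : List Char) (b : Nat) (hb : b < cs.length) :
    PySem.Chars.rfindFrom cs ['\n'] 0 (some ((b : Int) + 1)) =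
      (match pvLastNl (cs.take (b + 1)) with | none => (-1 : Int) | some k => (k : Int)) := by
  rw [PySem.Chars.rfindFrom]
  have he1 : ¬ ((cs.length : Int) < (b : Int) + 1) := by omega
  have he2 : ¬ ((b : Int) + 1 < 0) := by omega
  simp only [he1, if_false, he2]
  have hst : ¬ ((0 : Int) < 0) := by omega
  norm_num
  rw [if_neg he2, pvRfind_eq]
  cases pvLastNl (cs.take (b + 1)) with
  | none => simp
  | some k => simp

-- ===== assembling the verdict =====

theorem pvLines_eq (text : String) :
    (PySem.Str.split? text "\n").getD [] = (pvSplit text.toList).map String.ofList := by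
  rw [PySem.Str.split?, PySem.Chars.split?]
  have : ("\n".toList.isEmpty) = false := by decide
  rw [this]
  simp only [Bool.false_eq_true, if_false, Option.map_some, Option.getD_some]
  have : ("\n".toList) = ['\n'] := by decide
  rw [this, pvSplitOn_eq]

theorem pvJoin_singleton (s : String) : (PySem.Str.join "\n" [s]).toList = s.toList := by
  rw [PySem.Str.toList_join]
  simp [PySem.Chars.join, List.intercalate]

theorem pvJoin_toList (T : List (List Char)) :
    (PySem.Str.join "\n" (T.map String.ofList)).toList = List.intercalate ['\n'] T := by
  rw [PySem.Str.toList_join]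
  have h2 : (T.map String.ofList).map String.toList = T := by
    rw [List.map_map]
    simp only [Function.comp_def, String.toList_ofList, List.map_id']
  rw [h2, PySem.Chars.join]
  have h3 : ("\n".toList) = ['\n'] := by decide
  rw [h3]

theorem build_header_with_footer_py_spec_aux (text footer : String) :
    build_header_with_footer_py text footer = build_header_with_footer_py_alt text footer := by
  unfold build_header_with_footer_py build_header_with_footer_py_alt
  by_cases h0 : (1900 - PySem.Str.len footer) ≤ 0
  · simp only [h0, if_true]
  · simp only [h0, if_false]
    set b : Int := 1900 - PySem.Str.len footer with hbdef
    have hb0 : 0 < b := by omega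
    rw [pvLines_eq text]
    set cs : List Char := text.toList with hcs
    have hlen : PySem.Str.len text = (cs.length : Int) := by
      rw [PySem.Str.len_eq]
    by_cases hfit : PySem.Str.len text ≤ b
    · -- whole text fits: the loop keeps every line and the join rebuilds the text
      simp only [hfit, if_true]
      rw [pvALoop_eq_headS, pvHeadLinesS_map]
      rw [pvHeadLines_full (pvSplit cs) b (pvSplit_ne_nil cs)
        (by rw [pvIntercalate_split]; rw [hlen] at hfit; exact hfit)]
      have hne : ((pvSplit cs).map String.ofList).isEmpty = false := by
        cases hs : pvSplit cs with
        | nil => exact absurd hs (pvSplit_ne_nil cs)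
        | cons x xs => simp
      simp only [hne, Bool.false_eq_true, if_false]
      apply congrArg (· ++ footer)
      apply String.toList_inj.mp
      rw [pvJoin_toList, pvIntercalate_split]
    · -- text longer than the budget: compare with the last newline in the window
      simp only [hfit, if_false]
      set bn : Nat := b.toNat with hbn
      have hbcast : (bn : Int) = b := by omega
      have hblt : bn < cs.length := by rw [hlen] at hfit; omega
      have hwin := pvHead_window cs bn hblt
      have hrf : PySem.Str.rfindFrom text "\n" 0 (some ((bn : Int) + 1)) =
          (match pvLastNl (cs.take (bn + 1)) with | none => (-1 : Int) | some k => (k : Int)) := by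
        rw [PySem.Str.rfindFrom]
        have h3 : ("\n".toList) = ['\n'] := by decide
        rw [h3, ← hcs]
        exact pvRfindFrom_eq cs bn hblt
      rw [pvALoop_eq_headS, pvHeadLinesS_map, ← hbcast]
      cases hl : pvLastNl (cs.take (bn + 1)) with
      | none =>
        rw [hl] at hwin hrf
        obtain ⟨hA, hF⟩ := hwin
        rw [hA]
        simp only [List.map_nil, List.isEmpty_nil, if_true, hrf, beq_self_eq_true, if_true]
        apply congrArg (· ++ footer)
        apply String.toList_inj.mp
        have hhead : ((pvSplit cs).map String.ofList).headD ""
            = String.ofList ((pvSplit cs).headD []) := by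
          cases hs : pvSplit cs with
          | nil => exact absurd hs (pvSplit_ne_nil cs)
          | cons x xs => simp
        have hsl : ∀ (s : String), (PySem.Str.slice s none (some (bn : Int))).toList
            = s.toList.take bn := by
          intro s
          rw [PySem.Str.slice]
          simp [PySem.Chars.slice_eq_listSlice, PySem.List.slice_to_natCast]
        rw [pvJoin_singleton, hsl, hsl, hhead, String.toList_ofList, ← hcs]
        exact hF
      | some k =>
        rw [hl] at hwin hrf
        obtain ⟨hA, hJ⟩ := hwin
        have hne : ((pvHeadLines (bn : Int) (pvSplit cs)).map String.ofList).isEmpty = false := by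
          cases hs : pvHeadLines (bn : Int) (pvSplit cs) with
          | nil => exact absurd hs hA
          | cons x xs => simp
        simp only [hne, Bool.false_eq_true, if_false, hrf]
        have hkne : ((k : Int) == (-1 : Int)) = false := by simp
        rw [hkne]
        simp only [Bool.false_eq_true, if_false]
        apply congrArg (· ++ footer)
        apply String.toList_inj.mp
        rw [pvJoin_toList, hJ]
        rw [PySem.Str.slice]
        simp [PySem.Chars.slice_eq_listSlice, PySem.List.slice_to_natCast]
        exact congrArg (List.take k) hcs.symm

-- ===== VERDICT (by name: the statement is the Claim_ definition above) =====
theorem build_header_with_footer_py_spec : Claim_equal_build_header_with_footer_py := by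
  intro text footer _
  unfold Spec_build_header_with_footer_py
  exact build_header_with_footer_py_spec_aux text footer
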